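-- pv_equiv track=rewrite | github.com/jayantsingh123/Data_structures | recursion/recursive_sequence.py | recursive_sequence
-- ===== SOURCE A (Python) =====
-- def recursive_sequence(n):
--
--     """
--     for a given n,(say n=2) find the value given by following expression,
--     f(2) = 1+(2*3)
--
--     :param n:
--     :return:
--     """
--     curr, prod, total = 0, 1, 0
--     for i in range(n):
--         prod = 1
--         for k in range(i+1):
--             curr += 1
--             prod = prod*curr
--         total += prod
--     return total
-- ===== SOURCE B (Python) =====
-- def recursive_sequence(n):
--     # One flat pass over j = 1 .. n*(n+1)//2, closing a block at each
--     # triangular-number boundary, instead of A's nested loops.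
--     m = n * (n + 1) // 2 if n > 0 else 0
--     total, prod, step, boundary = 0, 1, 1, 1
--     for j in range(1, m + 1):
--         prod *= j
--         if j == boundary:
--             total += prod
--             prod = 1
--             step += 1
--             boundary += step
--     return total
-- ===== Notes on version B (the rewrite author's own statement) =====
-- stated objective: alternative
-- what changed: Replaces A's nested loops (outer over terms, inner over each block's factors) with a single flat loop over j = 1..n(n+1)/2 that multiplies j into a running product and closes a block whenever j hits the next triangular-number boundary.
import Mathlib
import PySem

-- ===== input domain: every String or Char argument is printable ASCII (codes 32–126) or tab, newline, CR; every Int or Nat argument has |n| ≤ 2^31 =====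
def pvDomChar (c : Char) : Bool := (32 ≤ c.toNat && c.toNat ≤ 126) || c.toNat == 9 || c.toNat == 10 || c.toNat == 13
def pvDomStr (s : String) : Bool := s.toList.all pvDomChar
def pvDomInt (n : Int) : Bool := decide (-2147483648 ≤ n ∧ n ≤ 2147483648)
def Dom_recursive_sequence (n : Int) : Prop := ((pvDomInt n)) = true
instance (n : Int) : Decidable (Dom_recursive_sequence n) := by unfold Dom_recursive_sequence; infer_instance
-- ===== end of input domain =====

-- B replaces A's nested loops with one flat loop over j = 1..n(n+1)/2 closing a block
-- at each triangular boundary (alternative decomposition, same cost).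

-- ===== PORT A =====
-- state: (curr, total); prod is reset to 1 at each outer iteration, so it is the
-- inner fold's initial accumulator (curr, 1).
def recursive_sequence (n : Int) : Int :=
  let st := (PySem.List.pyRange 0 n 1).foldl
    (fun (st : Int × Int) (i : Int) =>
      let inner := (PySem.List.pyRange 0 (i + 1) 1).foldl
        (fun (q : Int × Int) (_k : Int) => (q.1 + 1, q.2 * (q.1 + 1))) (st.1, 1)
      (inner.1, st.2 + inner.2))
    (0, 0)
  st.2

-- ===== PORT B =====
-- state: (total, prod, step, boundary)
def pvBStep (st : Int × Int × Int × Int) (j : Int) : Int × Int × Int × Int :=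
  let prod := st.2.1 * j
  if j = st.2.2.2 then (st.1 + prod, 1, st.2.2.1 + 1, st.2.2.2 + (st.2.2.1 + 1))
  else (st.1, prod, st.2.2.1, st.2.2.2)

def recursive_sequence_alt (n : Int) : Int :=
  let m : Int := if n > 0 then PySem.Int.floordiv (n * (n + 1)) 2 else 0
  let st := (PySem.List.pyRange 1 (m + 1) 1).foldl pvBStep (0, 1, 1, 1)
  st.1

-- ===== PRECONDITION & SPEC =====
def Spec_recursive_sequence (n : Int) (out : Int) : Prop := out = recursive_sequence_alt n
instance (n : Int) (out : Int) : Decidable (Spec_recursive_sequence n out) := by unfold Spec_recursive_sequence; infer_instance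

-- ===== CLAIM (what is proved, stated in full; the proofs are below) =====
def Claim_equal_recursive_sequence : Prop := ∀ (n : Int), Dom_recursive_sequence n → Spec_recursive_sequence n (recursive_sequence n)

-- ===== LEMMAS AND PROOFS =====

-- triangular numbers
def pvTri : Nat → Int
  | 0 => 0
  | N + 1 => pvTri N + (N + 1)

-- product of the m consecutive integers c+1, …, c+m
def pvP (c : Int) : Nat → Int
  | 0 => 1
  | m + 1 => pvP c m * (c + m + 1)

-- sum of the first N terms
def pvS : Nat → Int
  | 0 => 0
  | N + 1 => pvS N + pvP (pvTri N) (N + 1)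

lemma pvTri_nonneg (N : Nat) : 0 ≤ pvTri N := by
  induction N with
  | zero => simp [pvTri]
  | succ N ih => simp [pvTri]; omega

lemma pvTri_double (N : Nat) : pvTri N * 2 = (N : Int) * (N + 1) := by
  induction N with
  | zero => simp [pvTri]
  | succ N ih => simp [pvTri]; ring_nf; ring_nf at ih; linarith

-- A's inner loop
lemma A_inner (c p : Int) (m : Nat) :
    (PySem.List.pyRange 0 (m : Int) 1).foldl
      (fun (q : Int × Int) (_k : Int) => (q.1 + 1, q.2 * (q.1 + 1))) (c, p)
      = (c + m, p * pvP c m) := by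
  induction m generalizing p with
  | zero => simp [PySem.List.pyRange_one_eq_nil, pvP]
  | succ m ih =>
      rw [show ((m + 1 : Nat) : Int) = (m : Int) + 1 by push_cast; ring,
          PySem.List.pyRange_one_succ_right (by positivity),
          List.foldl_append, ih]
      simp [pvP]; constructor
      · ring
      · ring

-- A's outer loop
lemma A_fold (N : Nat) :
    (PySem.List.pyRange 0 (N : Int) 1).foldl
      (fun (st : Int × Int) (i : Int) =>
        let inner := (PySem.List.pyRange 0 (i + 1) 1).foldl
          (fun (q : Int × Int) (_k : Int) => (q.1 + 1, q.2 * (q.1 + 1))) (st.1, 1)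
        (inner.1, st.2 + inner.2))
      (0, 0)
      = (pvTri N, pvS N) := by
  induction N with
  | zero => simp [PySem.List.pyRange_one_eq_nil, pvTri, pvS]
  | succ N ih =>
      rw [show ((N + 1 : Nat) : Int) = (N : Int) + 1 by push_cast; ring,
          PySem.List.pyRange_one_succ_right (by positivity),
          List.foldl_append, ih]
      simp only [List.foldl_cons, List.foldl_nil]
      rw [show ((N : Int) + 1) = ((N + 1 : Nat) : Int) by push_cast; ring, A_inner]
      simp [pvTri, pvS]

-- B's loop over a stretch of j's all strictly below the boundary: no block closes
lemma B_nofire (c : Int) (m : Nat) (t p s b : Int) (hb : c + m < b) :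
    (PySem.List.pyRange (c + 1) (c + m + 1) 1).foldl pvBStep (t, p, s, b)
      = (t, p * pvP c m, s, b) := by
  induction m generalizing p with
  | zero => simp [PySem.List.pyRange_one_eq_nil, pvP]
  | succ m ih =>
      rw [show c + ((m : Nat) + 1 : Nat) + 1 = (c + m + 1) + 1 by push_cast; ring,
          PySem.List.pyRange_one_succ_right (by omega),
          List.foldl_append]
      rw [ih p (by push_cast at hb; omega)]
      have hne : c + (m : Int) + 1 ≠ b := by push_cast at hb; omega
      simp only [List.foldl_cons, List.foldl_nil, pvBStep, if_neg hne, pvP]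
      refine Prod.ext rfl (Prod.ext ?_ rfl)
      ring

-- B's loop over one full block of length m ending exactly at the boundary
lemma B_block (c : Int) (m : Nat) (hm : 0 < m) (t s : Int) :
    (PySem.List.pyRange (c + 1) (c + m + 1) 1).foldl pvBStep (t, 1, s, c + m)
      = (t + pvP c m, 1, s + 1, c + m + (s + 1)) := by
  obtain ⟨m', rfl⟩ : ∃ m', m = m' + 1 := ⟨m - 1, by omega⟩
  rw [show c + ((m' : Nat) + 1 : Nat) + 1 = (c + m' + 1) + 1 by push_cast; ring,
      PySem.List.pyRange_one_succ_right (by omega),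
      List.foldl_append, B_nofire c m' t 1 s _ (by push_cast; omega)]
  have heq : c + (m' : Int) + 1 = c + ((m' : Nat) + 1 : Nat) := by push_cast; ring
  simp only [List.foldl_cons, List.foldl_nil, pvBStep, if_pos heq, pvP]
  refine Prod.ext ?_ (Prod.ext rfl (Prod.ext rfl ?_)) <;> push_cast <;> ring

-- B's whole loop
lemma B_fold (N : Nat) :
    (PySem.List.pyRange 1 (pvTri N + 1) 1).foldl pvBStep (0, 1, 1, 1)
      = (pvS N, 1, (N : Int) + 1, pvTri (N + 1)) := by
  induction N with
  | zero => simp [pvTri, PySem.List.pyRange_one_eq_nil, pvS]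
  | succ N ih =>
      have h1 : (1 : Int) ≤ pvTri N + 1 := by have := pvTri_nonneg N; omega
      have h2 : pvTri N + 1 ≤ pvTri (N + 1) + 1 := by simp [pvTri]; omega
      rw [PySem.List.pyRange_one_append 1 (pvTri N + 1) (pvTri (N + 1) + 1) h1 h2,
          List.foldl_append, ih]
      have hsplit : pvTri (N + 1) + 1 = pvTri N + ((N + 1 : Nat) : Int) + 1 := by
        simp [pvTri]
      have hb : pvTri (N + 1) = pvTri N + ((N + 1 : Nat) : Int) := by
        simp [pvTri]
      rw [hsplit, hb, B_block (pvTri N) (N + 1) (by omega) (pvS N) ((N : Int) + 1)]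
      refine Prod.ext ?_ (Prod.ext rfl (Prod.ext ?_ ?_)) <;> simp [pvS, pvTri]

-- ===== VERDICT (by name: the statement is the Claim_ definition above) =====
theorem recursive_sequence_spec : Claim_equal_recursive_sequence := by
  intro n _
  unfold Spec_recursive_sequence recursive_sequence recursive_sequence_alt
  by_cases hn : n > 0
  · obtain ⟨N, rfl⟩ : ∃ N : Nat, n = (N : Int) := ⟨n.toNat, by omega⟩
    have hm : PySem.Int.floordiv ((N : Int) * ((N : Int) + 1)) 2 = pvTri N := by
      rw [← pvTri_double N, PySem.Int.floordiv_eq_ediv_of_pos (by norm_num),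
          Int.mul_ediv_cancel _ (by norm_num)]
    simp only [hn, if_pos, hm, A_fold N, B_fold N]
  · have h1 : PySem.List.pyRange 0 n 1 = [] := PySem.List.pyRange_one_eq_nil (by omega)
    simp [hn, h1, PySem.List.pyRange_one_eq_nil]
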